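-- pv_equiv track=rewrite | github.com/srczhou/ProficientPython | smallest_subarray_covering_set.py | find_smallest_subarray_covering_set
-- ===== SOURCE A (Python) =====
-- import collections
--
-- def find_smallest_subarray_covering_set(paragraph, keywords):
--     keywords_to_cover = collections.Counter(keywords)
--     result = (-1, -1)
--     remaining_to_cover = len(keywords)
--     left = 0
--     for right, p in enumerate(paragraph):
--         if p in keywords:
--             keywords_to_cover[p] -= 1
--             if keywords_to_cover[p] >= 0:
--                 remaining_to_cover -= 1
--
--         # Keeps advancing left until keywords_to_cover does not contain all
--         # keywords.
--         while remaining_to_cover == 0: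
--             if result == (-1, -1) or right - left < result[1] - result[0]:
--                 result = (left, right)
--             pl = paragraph[left]
--             if pl in keywords:
--                 keywords_to_cover[pl] += 1
--                 if keywords_to_cover[pl] > 0:
--                     remaining_to_cover += 1
--             left += 1
--     return result
-- ===== SOURCE B (Python) =====
-- import collections
--
-- def _kth_last_occurrence(paragraph, k, c, right):
--     # index of the c-th most recent occurrence of k in paragraph[:right+1], or None
--     seen = 0
--     for i in range(right, -1, -1):
--         if paragraph[i] == k:
--             seen += 1
--             if seen == c:
--                 return i
--     return None
--
-- def _latest_cover_start(paragraph, required, right):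
--     # largest l such that paragraph[l:right+1] contains every keyword with
--     # its required multiplicity, or None if the whole prefix does not
--     l = None
--     for k, c in required.items():
--         i = _kth_last_occurrence(paragraph, k, c, right)
--         if i is None:
--             return None
--         l = i if l is None else min(l, i)
--     return l
--
-- def find_smallest_subarray_covering_set(paragraph, keywords):
--     required = collections.Counter(keywords)
--     best = (-1, -1)
--     for right in range(len(paragraph)):
--         l = _latest_cover_start(paragraph, required, right)
--         if l is not None and (best == (-1, -1) or right - l < best[1] - best[0]):
--             best = (l, right)
--     return best
-- ===== Notes on version B (the rewrite author's own statement) =====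
-- stated objective: alternative
-- what changed: Replaced the incremental sliding-window two-pointer scan (Counter deficit + advancing left) by a stateless per-right recomputation: for each right index the latest covering start is computed directly as the minimum over keywords of the index of the c-th most recent occurrence found by a backward scan, and the best window is folded with strict improvement.
import Mathlib
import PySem

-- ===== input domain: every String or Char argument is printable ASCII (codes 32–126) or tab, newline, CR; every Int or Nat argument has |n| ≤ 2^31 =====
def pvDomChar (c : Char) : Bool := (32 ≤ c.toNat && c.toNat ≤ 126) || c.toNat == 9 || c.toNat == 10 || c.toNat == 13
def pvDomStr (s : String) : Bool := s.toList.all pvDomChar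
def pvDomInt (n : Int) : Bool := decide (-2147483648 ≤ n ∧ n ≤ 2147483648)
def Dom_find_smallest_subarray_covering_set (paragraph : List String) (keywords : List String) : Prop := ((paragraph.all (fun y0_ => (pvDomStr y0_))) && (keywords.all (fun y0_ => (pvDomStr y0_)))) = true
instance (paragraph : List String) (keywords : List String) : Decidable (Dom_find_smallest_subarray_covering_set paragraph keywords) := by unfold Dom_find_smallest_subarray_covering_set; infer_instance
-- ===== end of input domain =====

-- B replaces A's incremental sliding-window scan by a stateless per-right
-- recomputation of the latest covering start via backward scans (objective:
-- alternative algorithm, not faster).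

-- ===== PORT A =====
-- A's inner `while remaining_to_cover == 0` loop; fuel only makes the
-- recursion total (inside Pre_ the loop runs at most paragraph.length + 1
-- times); pyGet? = none is where the Python raises IndexError (outside Pre_).
def aWhile (paragraph : List String) (keywords : List String) (right : Int) :
    Nat → PySem.Dict String Int × Int × Int × (Int × Int) →
    PySem.Dict String Int × Int × Int × (Int × Int)
  | 0, st => st
  | fuel + 1, (d, remaining, left, result) =>
    if remaining = 0 then
      let result' := if result = (-1, -1) ∨ right - left < result.2 - result.1 then (left, right) else result
      match PySem.List.pyGet? paragraph left with
      | none => (d, remaining, left, result')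
      | some pl =>
        if pl ∈ keywords then
          let d' := d.modify pl 0 (· + 1)
          let remaining' := if d'.getD pl 0 > 0 then remaining + 1 else remaining
          aWhile paragraph keywords right fuel (d', remaining', left + 1, result')
        else
          aWhile paragraph keywords right fuel (d, remaining, left + 1, result')
    else (d, remaining, left, result)

-- one iteration of A's `for right, p in enumerate(paragraph)` body
def aStep (paragraph : List String) (keywords : List String)
    (st : PySem.Dict String Int × Int × Int × (Int × Int)) (rp : Int × String) :
    PySem.Dict String Int × Int × Int × (Int × Int) :=
  let st1 := if rp.2 ∈ keywords then
      let d' := st.1.modify rp.2 0 (· - 1)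
      (d', if d'.getD rp.2 0 ≥ 0 then st.2.1 - 1 else st.2.1, st.2.2.1, st.2.2.2)
    else st
  aWhile paragraph keywords rp.1 (paragraph.length + 1) st1

def find_smallest_subarray_covering_set (paragraph : List String) (keywords : List String) : List Int :=
  let final := (PySem.List.enumerate paragraph 0).foldl (aStep paragraph keywords)
    (PySem.Dict.counter keywords, PySem.List.len keywords, (0 : Int), ((-1 : Int), (-1 : Int)))
  [final.2.2.2.1, final.2.2.2.2]

-- ===== PORT B =====
-- _kth_last_occurrence: backward scan over the index list range(right, -1, -1)
def bScan (paragraph : List String) (k : String) (c : Int) : List Int → Int → Option Int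
  | [], _ => none
  | i :: rest, seen =>
    if PySem.List.pyGetD paragraph i "" = k then
      if seen + 1 = c then some i else bScan paragraph k c rest (seen + 1)
    else bScan paragraph k c rest seen

-- _latest_cover_start: loop over required.items() keeping the running minimum
def bCand (paragraph : List String) (right : Int) : List (String × Int) → Option Int → Option Int
  | [], l => l
  | (k, c) :: rest, l =>
    match bScan paragraph k c (PySem.List.pyRange right (-1) (-1)) 0 with
    | none => none
    | some i => bCand paragraph right rest (some (match l with | none => i | some l0 => min l0 i))

def find_smallest_subarray_covering_set_alt (paragraph : List String) (keywords : List String) : List Int :=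
  let required := PySem.Dict.counter keywords
  let best := (PySem.List.pyRange 0 (PySem.List.len paragraph) 1).foldl
    (fun best right =>
      match bCand paragraph right required.items none with
      | none => best
      | some l => if best = (-1, -1) ∨ right - l < best.2 - best.1 then (l, right) else best)
    ((-1 : Int), (-1 : Int))
  [best.1, best.2]

-- ===== PRECONDITION & SPEC =====
-- Pre_ excludes keywords = [] with a non-empty paragraph: there A's left
-- pointer runs past the end of paragraph and A raises IndexError.
def Pre_find_smallest_subarray_covering_set (paragraph : List String) (keywords : List String) : Prop :=
  keywords ≠ [] ∨ paragraph = []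
instance (paragraph : List String) (keywords : List String) : Decidable (Pre_find_smallest_subarray_covering_set paragraph keywords) := by unfold Pre_find_smallest_subarray_covering_set; infer_instance

def pvWitness_find_smallest_subarray_covering_set : List String × List String := (["a", "b", "a"], ["a", "a"])


def Spec_find_smallest_subarray_covering_set (paragraph : List String) (keywords : List String) (out : List Int) : Prop := out = find_smallest_subarray_covering_set_alt paragraph keywords
instance (paragraph : List String) (keywords : List String) (out : List Int) : Decidable (Spec_find_smallest_subarray_covering_set paragraph keywords out) := by unfold Spec_find_smallest_subarray_covering_set; infer_instance

-- ===== CLAIM (what is proved, stated in full; the proofs are below) =====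
def Claim_equal_find_smallest_subarray_covering_set : Prop := ∀ (paragraph : List String) (keywords : List String), Dom_find_smallest_subarray_covering_set paragraph keywords → Pre_find_smallest_subarray_covering_set paragraph keywords → Spec_find_smallest_subarray_covering_set paragraph keywords (find_smallest_subarray_covering_set paragraph keywords)


-- ===== LEMMAS AND PROOFS =====

-- the window paragraph[l .. r] (both ends included)
def win (P : List String) (l r : Nat) : List String := (P.take (r + 1)).drop l

-- `paragraph[l:r+1] covers the keyword multiset`
def covb (P K : List String) (l r : Nat) : Bool := K.all (fun k => K.count k ≤ (win P l r).count k)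

-- latest covering start for right end r, if the prefix covers at all
def mCand (P K : List String) (r : Nat) : Option Nat :=
  if covb P K 0 r = true then some (Nat.findGreatest (fun l => covb P K l r = true) r) else none

def improve (res : Int × Int) (l r : Int) : Int × Int :=
  if res = (-1, -1) ∨ r - l < res.2 - res.1 then (l, r) else res

-- the best (start, end) pair after considering right ends 0 .. r-1
def specF (P K : List String) : Nat → Int × Int
  | 0 => (-1, -1)
  | r + 1 =>
    match mCand P K r with
    | none => specF P K r
    | some m => improve (specF P K r) ((m : Int)) ((r : Int))

-- A's remaining_to_cover as a function of the current window
def Rsum (K w : List String) : Int :=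
  ((PySem.Set.ofList K).map (fun k => max 0 ((K.count k : Int) - ((w.count k : Int))))).sum

lemma win_cons (P : List String) (L r : Nat) (hL : L ≤ r) (hr : r < P.length) :
    win P L r = P[L]'(by omega) :: win P (L + 1) r := by
  unfold win
  rw [List.drop_eq_getElem_cons (by simp [List.length_take]; omega)]
  congr 1
  simp [List.getElem_take]

lemma win_empty (P : List String) (L r : Nat) (h : r + 1 ≤ L) : win P L r = [] := by
  apply List.drop_eq_nil_of_le
  simp [List.length_take]; omega

lemma count_win_anti (P : List String) (k : String) (l l' r : Nat) (h : l ≤ l') :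
    (win P l' r).count k ≤ (win P l r).count k := by
  have : win P l' r = (win P l r).drop (l' - l) := by
    unfold win; rw [List.drop_drop]; congr 1; omega
  rw [this]
  exact (List.drop_sublist _ _).count_le k

lemma win_append (P : List String) (L r : Nat) (hL : L ≤ r) (hr : r < P.length) :
    win P L r = (P.take r).drop L ++ [P[r]] := by
  unfold win
  rw [List.take_add_one, List.getElem?_eq_getElem hr]
  rw [List.drop_append_of_le_length (by simp [List.length_take]; omega)]
  rfl

lemma covb_anti_left (P K : List String) (l l' r : Nat) (h : l ≤ l')
    (hc : covb P K l' r = true) : covb P K l r = true := by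
  simp only [covb, List.all_eq_true, decide_eq_true_eq] at *
  intro k hk
  exact le_trans (hc k hk) (count_win_anti P k l l' r h)

lemma covb_mono_right (P K : List String) (l r : Nat) (hc : covb P K l r = true) :
    covb P K l (r + 1) = true := by
  simp only [covb, List.all_eq_true, decide_eq_true_eq] at *
  intro k hk
  refine le_trans (hc k hk) ?_
  have hpre : P.take (r + 1) <+: P.take (r + 2) := by
    rw [show P.take (r + 1) = (P.take (r + 2)).take (r + 1) by
      rw [List.take_take]; congr 1; omega]
    exact List.take_prefix _ _
  have hsub : List.Sublist ((P.take (r + 1)).drop l) ((P.take (r + 2)).drop l) := by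
    obtain ⟨t, ht⟩ := hpre
    rw [← ht, List.drop_append]
    exact List.sublist_append_left _ _
  exact hsub.count_le k

lemma covb_empty_false (P K : List String) (L r : Nat) (hK : K ≠ []) (h : r + 1 ≤ L) :
    covb P K L r = false := by
  simp only [covb]
  apply List.all_eq_false.2
  refine ⟨K.head hK, List.head_mem hK, ?_⟩
  simp [win_empty P L r h]
  exact (List.count_pos_iff.2 (List.head_mem hK)).ne'

lemma covb_le (P K : List String) (L r : Nat) (hK : K ≠ [])
    (hc : covb P K L r = true) : L ≤ r := by
  by_contra h
  rw [covb_empty_false P K L r hK (by omega)] at hc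
  exact Bool.false_ne_true hc

lemma sum_map_sub_single {α : Type} (l : List α) (a : α) (f g : α → Int)
    (hnd : l.Nodup) (ha : a ∈ l) (h : ∀ x ∈ l, x ≠ a → f x = g x) :
    (l.map f).sum = (l.map g).sum + (f a - g a) := by
  induction l with
  | nil => cases ha
  | cons x xs ih =>
    rcases List.mem_cons.1 ha with rfl | hmem
    · have : ∀ y ∈ xs, f y = g y := by
        intro y hy
        exact h y (List.mem_cons_of_mem _ hy) (fun he => (List.nodup_cons.1 hnd).1 (he ▸ hy))
      simp only [List.map_cons, List.sum_cons]
      rw [List.map_congr_left this]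
      ring
    · have hxa : x ≠ a := fun he => (List.nodup_cons.1 hnd).1 (he ▸ hmem)
      simp only [List.map_cons, List.sum_cons]
      rw [ih (List.nodup_cons.1 hnd).2 hmem (fun y hy => h y (List.mem_cons_of_mem _ hy))]
      rw [h x (List.mem_cons_self) hxa]
      ring

lemma Rsum_congr (K w w' : List String) (h : ∀ k ∈ K, w.count k = w'.count k) :
    Rsum K w = Rsum K w' := by
  unfold Rsum
  congr 1
  apply List.map_congr_left
  intro k hk
  rw [h k ((PySem.Set.mem_ofList K k).1 hk)]

lemma Rsum_nil (K : List String) : Rsum K [] = K.length := by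
  unfold Rsum
  have h1 : ∀ k ∈ PySem.Set.ofList K, max 0 ((K.count k : Int) - (([] : List String).count k : Int)) = (K.count k : Int) := by
    intro k _; simp
  rw [List.map_congr_left h1]
  rw [show List.map (fun k => (K.count k : Int)) (PySem.Set.ofList K)
      = List.map Nat.cast (List.map (fun k => K.count k) (PySem.Set.ofList K)) by
    rw [List.map_map]; rfl]
  rw [← Nat.cast_list_sum]
  norm_cast
  rw [← List.sum_toFinset _ (PySem.Set.nodup_ofList K)]
  rw [show (PySem.Set.ofList K).toFinset = K.toFinset by
    ext x; simp [List.mem_toFinset, PySem.Set.mem_ofList]]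
  exact List.sum_toFinset_count_eq_length K

lemma Rsum_append (K w : List String) (p : String) (hp : p ∈ K) :
    Rsum K (w ++ [p]) = Rsum K w - (if (w.count p : Int) < (K.count p : Int) then 1 else 0) := by
  unfold Rsum
  rw [sum_map_sub_single (PySem.Set.ofList K) p _ _ (PySem.Set.nodup_ofList K)
    ((PySem.Set.mem_ofList K p).2 hp)
    (by intro x _ hx
        have : (w ++ [p]).count x = w.count x := by
          simp [List.count_append, Ne.symm hx]
        rw [this])]
  have hc : ((w ++ [p]).count p : Int) = (w.count p : Int) + 1 := by
    simp [List.count_append]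
  rw [hc]
  split_ifs with h
  · rw [max_eq_right (by omega), max_eq_right (by omega)]; omega
  · rw [max_eq_left (by omega), max_eq_left (by omega)]; omega

lemma Rsum_append_not (K w : List String) (p : String) (hp : p ∉ K) :
    Rsum K (w ++ [p]) = Rsum K w := by
  apply Rsum_congr
  intro k hk
  rw [List.count_append]
  have : p ≠ k := fun he => hp (he ▸ hk)
  simp [this]

lemma Rsum_cons (K w : List String) (x : String) (hx : x ∈ K) :
    Rsum K (x :: w) = Rsum K w - (if (w.count x : Int) < (K.count x : Int) then 1 else 0) := by
  rw [Rsum_congr K (x :: w) (w ++ [x]) (by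
    intro k hk
    rw [List.count_append, List.count_cons]
    rcases eq_or_ne x k with rfl | h
    · simp
    · simp [h])]
  exact Rsum_append K w x hx

lemma Rsum_cons_not (K w : List String) (x : String) (hx : x ∉ K) :
    Rsum K (x :: w) = Rsum K w := by
  apply Rsum_congr
  intro k hk
  rw [List.count_cons_of_ne (by rintro rfl; exact hx hk)]

lemma sum_int_nonneg_eq_zero (l : List Int) (h : ∀ x ∈ l, 0 ≤ x) :
    l.sum = 0 ↔ ∀ x ∈ l, x = 0 := by
  induction l with
  | nil => simp
  | cons x xs ih =>
    have hx := h x (List.mem_cons_self)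
    have hxs : ∀ y ∈ xs, 0 ≤ y := fun y hy => h y (List.mem_cons_of_mem _ hy)
    have hs := List.sum_nonneg hxs
    simp only [List.sum_cons, List.mem_cons]
    constructor
    · intro he
      have hx0 : x = 0 := by omega
      have : xs.sum = 0 := by omega
      intro y hy
      rcases hy with rfl | hy
      · exact hx0
      · exact (ih hxs).1 this y hy
    · intro hall
      rw [hall x (Or.inl rfl), (ih hxs).2 (fun y hy => hall y (Or.inr hy))]
      ring

lemma Rsum_eq_zero_iff (K w : List String) :
    Rsum K w = 0 ↔ ∀ k ∈ K, K.count k ≤ w.count k := by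
  unfold Rsum
  rw [sum_int_nonneg_eq_zero _ (by
    intro x hx
    rcases List.mem_map.1 hx with ⟨k, _, rfl⟩
    exact le_max_left _ _)]
  constructor
  · intro h k hk
    have hmem := h _ (List.mem_map.2 ⟨k, (PySem.Set.mem_ofList K k).2 hk, rfl⟩)
    by_contra hc
    push Not at hc
    rw [max_eq_right (by omega : (0 : Int) ≤ (K.count k : Int) - (w.count k : Int))] at hmem
    omega
  · intro h x hx
    rcases List.mem_map.1 hx with ⟨k, hk, rfl⟩
    have := h k ((PySem.Set.mem_ofList K k).1 hk)
    rw [max_eq_left (by omega)]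

lemma improve_improve (res : Int × Int) (l m r : Int) (h0 : 0 ≤ r) (hlm : l ≤ m) :
    improve (improve res l r) m r = improve res m r := by
  obtain ⟨a, b⟩ := res
  unfold improve
  simp only [Prod.mk.injEq]
  split_ifs <;> (try simp_all [Prod.mk.injEq]) <;> try omega

lemma mCand_none_iff (P K : List String) (r : Nat) :
    mCand P K r = none ↔ covb P K 0 r = false := by
  unfold mCand
  split_ifs with h <;> simp_all

lemma mCand_some (P K : List String) (r m : Nat) (hm : mCand P K r = some m) :
    covb P K 0 r = true ∧ m = Nat.findGreatest (fun l => covb P K l r = true) r := by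
  unfold mCand at hm
  split_ifs at hm with h
  exact ⟨h, (Option.some_injective _ hm).symm⟩

lemma mCand_cov (P K : List String) (r m : Nat) (hm : mCand P K r = some m) :
    covb P K m r = true := by
  obtain ⟨h0, rfl⟩ := mCand_some P K r m hm
  exact Nat.findGreatest_spec (P := fun l => covb P K l r = true) (Nat.zero_le r) h0

lemma mCand_ge (P K : List String) (r m l : Nat) (hm : mCand P K r = some m)
    (hl : l ≤ r) (hc : covb P K l r = true) : l ≤ m := by
  obtain ⟨_, rfl⟩ := mCand_some P K r m hm
  exact Nat.le_findGreatest hl hc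

lemma mCand_le (P K : List String) (r m : Nat) (hm : mCand P K r = some m) : m ≤ r := by
  obtain ⟨_, rfl⟩ := mCand_some P K r m hm
  exact Nat.findGreatest_le r

lemma covb_of_rsum_zero (P K : List String) (L r : Nat)
    (h : Rsum K (win P L r) = 0) : covb P K L r = true := by
  simp only [covb, List.all_eq_true, decide_eq_true_eq]
  exact (Rsum_eq_zero_iff K (win P L r)).1 h

lemma rsum_ne_zero_of_not_covb (P K : List String) (L r : Nat)
    (h : covb P K L r = false) : Rsum K (win P L r) ≠ 0 := by
  intro h0
  rw [covb_of_rsum_zero P K L r h0] at h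
  cases h

lemma aWhile_exit (P K : List String) (right : Int) (fuel : Nat)
    (d : PySem.Dict String Int) (rem left : Int) (res : Int × Int) (hrem : rem ≠ 0) :
    aWhile P K right fuel (d, rem, left, res) = (d, rem, left, res) := by
  cases fuel with
  | zero => rfl
  | succ n => simp [aWhile, hrem]

lemma aWhile_covered (P K : List String) (hK : K ≠ []) (r : Nat) (hr : r < P.length)
    (m : Nat) (hm : mCand P K r = some m) :
    ∀ (fuel : Nat) (L : Nat) (d : PySem.Dict String Int) (rem : Int) (res : Int × Int),
    r + 2 - L ≤ fuel → L ≤ r + 1 →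
    (∀ k ∈ K, d.getD k 0 = (K.count k : Int) - ((win P L r).count k : Int)) →
    rem = Rsum K (win P L r) →
    (L = 0 ∨ covb P K (L - 1) r = true) →
    (L = 0 ∨ (res ≠ (-1, -1) ∧ res.2 - res.1 ≤ (r : Int) - (L : Int) + 1)) →
    ∃ d' : PySem.Dict String Int,
      aWhile P K (r : Int) fuel (d, rem, (L : Int), res) =
        (d', Rsum K (win P (m + 1) r), ((m + 1 : Nat) : Int), improve res (m : Int) (r : Int)) ∧
      ∀ k ∈ K, d'.getD k 0 = (K.count k : Int) - ((win P (m + 1) r).count k : Int) := by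
  intro fuel
  induction fuel with
  | zero => intro L d rem res hfuel hL _ _ _ _; omega
  | succ fuel ih =>
    intro L d rem res hfuel hL hd hrem h5 h7
    by_cases hrem0 : rem = 0
    · -- window covers: record, advance left
      have hcovL : covb P K L r = true := covb_of_rsum_zero P K L r (hrem ▸ hrem0)
      have hLr : L ≤ r := covb_le P K L r hK hcovL
      have hLm : L ≤ m := mCand_ge P K r m L hm hLr hcovL
      have hwin : win P L r = P[L]'(by omega) :: win P (L + 1) r := win_cons P L r hLr hr
      have hget : PySem.List.pyGet? P ((L : Nat) : Int) = some (P[L]'(by omega)) := by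
        rw [PySem.List.pyGet?_natCast]
        exact List.getElem?_eq_getElem (by omega)
      have hres' : (if res = (-1, -1) ∨ (r : Int) - (L : Int) < res.2 - res.1
          then ((L : Int), (r : Int)) else res) = improve res (L : Int) (r : Int) := rfl
      have hstep : aWhile P K (r : Int) (fuel + 1) (d, rem, (L : Int), res) =
          (if P[L]'(by omega) ∈ K then
             aWhile P K (r : Int) fuel (d.modify (P[L]'(by omega)) 0 (· + 1),
               (if (d.modify (P[L]'(by omega)) 0 (· + 1)).getD (P[L]'(by omega)) 0 > 0 then rem + 1 else rem),
               (L : Int) + 1, improve res (L : Int) (r : Int))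
           else aWhile P K (r : Int) fuel (d, rem, (L : Int) + 1, improve res (L : Int) (r : Int))) := by
        simp only [aWhile, if_pos hrem0, hget]
        rfl
      have hcast : ((L : Int) + 1) = ((L + 1 : Nat) : Int) := by push_cast; ring
      have h7' : improve res (L : Int) (r : Int) ≠ (-1, -1) ∧
          (improve res (L : Int) (r : Int)).2 - (improve res (L : Int) (r : Int)).1 ≤
            (r : Int) - ((L + 1 : Nat) : Int) + 1 := by
        unfold improve
        split_ifs with hc
        · constructor
          · intro hcon
            rw [Prod.mk.injEq] at hcon
            omega
          · simp only []
            push_cast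
            omega
        · push Not at hc
          exact ⟨hc.1, by push_cast; omega⟩
      by_cases hplK : P[L]'(by omega) ∈ K
      · have hd2 : ∀ k ∈ K, (d.modify (P[L]'(by omega)) 0 (· + 1)).getD k 0 =
            (K.count k : Int) - ((win P (L + 1) r).count k : Int) := by
          intro k hk
          rw [PySem.Dict.getD_modify]
          split_ifs with he
          · subst he
            rw [hd _ hk, hwin, List.count_cons_self]
            push_cast
            ring
          · rw [hd k hk, hwin, List.count_cons_of_ne (fun hh => he hh.symm)]
        have hrem2 : (if (d.modify (P[L]'(by omega)) 0 (· + 1)).getD (P[L]'(by omega)) 0 > 0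
            then rem + 1 else rem) = Rsum K (win P (L + 1) r) := by
          rw [hd2 _ hplK, hrem, hwin, Rsum_cons K (win P (L + 1) r) _ hplK]
          split_ifs <;> omega
        obtain ⟨d'', heq, hd''⟩ := ih (L + 1) (d.modify (P[L]'(by omega)) 0 (· + 1))
          (Rsum K (win P (L + 1) r)) (improve res (L : Int) (r : Int))
          (by omega) (by omega) hd2 rfl
          (Or.inr (by simpa using hcovL)) (Or.inr h7')
        refine ⟨d'', ?_, hd''⟩
        rw [hstep, if_pos hplK, hrem2, hcast, heq,
          improve_improve res (L : Int) (m : Int) (r : Int) (by omega) (by exact_mod_cast hLm)]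
      · have hd2 : ∀ k ∈ K, d.getD k 0 =
            (K.count k : Int) - ((win P (L + 1) r).count k : Int) := by
          intro k hk
          rw [hd k hk, hwin, List.count_cons_of_ne (by rintro rfl; exact hplK hk)]
        have hrem2 : rem = Rsum K (win P (L + 1) r) := by
          rw [hrem, hwin, Rsum_cons_not K (win P (L + 1) r) _ hplK]
        obtain ⟨d'', heq, hd''⟩ := ih (L + 1) d rem (improve res (L : Int) (r : Int))
          (by omega) (by omega) hd2 hrem2
          (Or.inr (by simpa using hcovL)) (Or.inr h7')
        refine ⟨d'', ?_, hd''⟩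
        rw [hstep, if_neg hplK, hcast, heq,
          improve_improve res (L : Int) (m : Int) (r : Int) (by omega) (by exact_mod_cast hLm)]
    · -- window does not cover: the loop exits; here L = m + 1 already
      have hncov : covb P K L r = false := by
        cases h : covb P K L r
        · rfl
        · exfalso
          apply hrem0
          rw [hrem]
          apply (Rsum_eq_zero_iff K (win P L r)).2
          simpa only [covb, List.all_eq_true, decide_eq_true_eq] using h
      have hcov0 : covb P K 0 r = true := (mCand_some P K r m hm).1
      have hL0 : L ≠ 0 := by
        intro h0
        subst h0
        rw [hcov0] at hncov
        cases hncov
      have h5' : covb P K (L - 1) r = true := h5.resolve_left hL0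
      have hL1r : L - 1 ≤ r := covb_le P K (L - 1) r hK h5'
      have hge : L - 1 ≤ m := mCand_ge P K r m (L - 1) hm hL1r h5'
      have hmL : m < L := by
        by_contra hc
        push Not at hc
        rw [covb_anti_left P K L m r hc (mCand_cov P K r m hm)] at hncov
        cases hncov
      have hLm1 : L = m + 1 := by omega
      subst hLm1
      obtain ⟨hres, hdiff⟩ := h7.resolve_left hL0
      have himp : improve res (m : Int) (r : Int) = res := by
        unfold improve
        rw [if_neg]
        rintro (h | h)
        · exact hres h
        · push_cast at hdiff
          omega
      refine ⟨d, ?_, hd⟩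
      rw [aWhile_exit P K (r : Int) (fuel + 1) d rem (((m + 1 : Nat) : Int)) res hrem0, hrem, himp]

def aInit (K : List String) : PySem.Dict String Int × Int × Int × (Int × Int) :=
  (PySem.Dict.counter K, PySem.List.len K, (0 : Int), ((-1 : Int), (-1 : Int)))

def aFold (P K : List String) (r : Nat) : PySem.Dict String Int × Int × Int × (Int × Int) :=
  (PySem.List.enumerate (P.take r) 0).foldl (aStep P K) (aInit K)

lemma aFold_succ (P K : List String) (r : Nat) (hr : r < P.length) :
    aFold P K (r + 1) = aStep P K (aFold P K r) ((r : Int), P[r]) := by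
  unfold aFold
  rw [List.take_add_one, List.getElem?_eq_getElem hr]
  simp only [Option.toList_some]
  rw [PySem.List.enumerate_append, List.foldl_append]
  have hmin : (min (r : Int) (P.length : Int)) = (r : Int) := min_eq_left (by exact_mod_cast hr.le)
  simp [PySem.List.enumerate_cons, PySem.List.enumerate_nil, List.length_take, hmin]

lemma aFold_spec (P K : List String) (hK : K ≠ []) :
    ∀ r : Nat, r ≤ P.length →
    ∃ (d : PySem.Dict String Int) (L : Nat),
      aFold P K r = (d, Rsum K ((P.take r).drop L), (L : Int), specF P K r) ∧
      (∀ k ∈ K, d.getD k 0 = (K.count k : Int) - (((P.take r).drop L).count k : Int)) ∧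
      L ≤ r ∧
      (L = 0 ∨ (r ≠ 0 ∧ covb P K (L - 1) (r - 1) = true)) ∧
      (L = 0 ∨ (specF P K r ≠ (-1, -1) ∧
        (specF P K r).2 - (specF P K r).1 ≤ (r : Int) - (L : Int))) := by
  intro r
  induction r with
  | zero =>
    intro _
    refine ⟨PySem.Dict.counter K, 0, ?_, ?_, le_rfl, Or.inl rfl, Or.inl rfl⟩
    · unfold aFold aInit
      simp [PySem.List.enumerate_nil, PySem.List.len_eq, Rsum_nil, specF]
    · intro k hk
      simp [PySem.Dict.getD_counter]
  | succ r ihr =>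
    intro hr1
    have hr : r < P.length := by omega
    obtain ⟨d, L, heq, hd, hLr, h5, h7⟩ := ihr (by omega)
    rw [aFold_succ P K r hr, heq]
    have hwa : win P L r = (P.take r).drop L ++ [P[r]] := win_append P L r hLr hr
    have hstep : ∃ d1 : PySem.Dict String Int,
        aStep P K (d, Rsum K ((P.take r).drop L), (L : Int), specF P K r) ((r : Int), P[r]) =
          aWhile P K (r : Int) (P.length + 1) (d1, Rsum K (win P L r), (L : Int), specF P K r) ∧
        (∀ k ∈ K, d1.getD k 0 = (K.count k : Int) - ((win P L r).count k : Int)) := by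
      by_cases hpK : P[r] ∈ K
      · refine ⟨d.modify P[r] 0 (· - 1), ?_, ?_⟩
        · have hd1p : (d.modify P[r] 0 (· - 1)).getD P[r] 0 =
              (K.count P[r] : Int) - (((P.take r).drop L).count P[r] : Int) - 1 := by
            rw [PySem.Dict.getD_modify, if_pos rfl, hd _ hpK]
          have hrem1 : (if (d.modify P[r] 0 (· - 1)).getD P[r] 0 ≥ 0
              then Rsum K ((P.take r).drop L) - 1 else Rsum K ((P.take r).drop L)) =
              Rsum K (win P L r) := by
            rw [hd1p, hwa, Rsum_append K _ _ hpK]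
            split_ifs <;> omega
          simp only [aStep, if_pos hpK]
          rw [hrem1]
        · intro k hk
          have hcnt : (((win P L r).count k : Nat) : Int) =
              ((((P.take r).drop L).count k : Nat) : Int) + (if P[r] = k then 1 else 0) := by
            rw [hwa, List.count_append]
            by_cases hif : P[r] = k
            · subst hif
              simp
            · simp [hif]
          rw [PySem.Dict.getD_modify]
          split_ifs with he
          · subst he
            rw [hd _ hk, hcnt, if_pos rfl]
            ring
          · rw [hd k hk, hcnt, if_neg (fun hh => he hh.symm)]
            ring
      · refine ⟨d, ?_, ?_⟩
        · have hrem1 : Rsum K ((P.take r).drop L) = Rsum K (win P L r) := by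
            rw [hwa, Rsum_append_not K _ _ hpK]
          simp only [aStep, if_neg hpK]
          rw [hrem1]
        · intro k hk
          rw [hd k hk, hwa, List.count_append,
            show (List.count k [P[r]]) = 0 by
              rw [List.count_eq_zero]
              simp only [List.mem_singleton]
              rintro rfl
              exact hpK hk]
          norm_num
    obtain ⟨d1, ha, hd1⟩ := hstep
    have h5' : L = 0 ∨ covb P K (L - 1) r = true := by
      rcases h5 with h50 | ⟨hr0, hcv⟩
      · exact Or.inl h50
      · refine Or.inr ?_
        have := covb_mono_right P K (L - 1) (r - 1) hcv
        rwa [Nat.sub_add_cancel (by omega)] at this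
    cases hmc : mCand P K r with
    | none =>
      have hncov := (mCand_none_iff P K r).1 hmc
      have hnL : covb P K L r = false := by
        cases h : covb P K L r
        · rfl
        · rw [covb_anti_left P K 0 L r (Nat.zero_le L) h] at hncov
          cases hncov
      have hrne := rsum_ne_zero_of_not_covb P K L r hnL
      rw [ha, aWhile_exit P K (r : Int) (P.length + 1) d1 _ (L : Int) _ hrne]
      have hsf : specF P K (r + 1) = specF P K r := by simp [specF, hmc]
      refine ⟨d1, L, ?_, ?_, by omega, ?_, ?_⟩
      · rw [hsf]
        unfold win
        rfl
      · intro k hk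
        exact hd1 k hk
      · rcases h5' with h50 | hcv
        · exact Or.inl h50
        · exact Or.inr ⟨by omega, by simpa using hcv⟩
      · rcases h7 with h70 | ⟨ha7, hb7⟩
        · exact Or.inl h70
        · exact Or.inr ⟨by rw [hsf]; exact ha7, by rw [hsf]; push_cast; omega⟩
    | some m =>
      have h7' : L = 0 ∨ (specF P K r ≠ (-1, -1) ∧
          (specF P K r).2 - (specF P K r).1 ≤ (r : Int) - (L : Int) + 1) := by
        rcases h7 with h70 | ⟨ha7, hb7⟩
        · exact Or.inl h70
        · exact Or.inr ⟨ha7, by omega⟩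
      obtain ⟨d', hwhile, hd'⟩ := aWhile_covered P K hK r hr m hmc (P.length + 1) L d1
        (Rsum K (win P L r)) (specF P K r) (by omega) (by omega) hd1 rfl h5' h7'
      rw [ha, hwhile]
      have hmr : m ≤ r := mCand_le P K r m hmc
      have hsf : specF P K (r + 1) = improve (specF P K r) (m : Int) (r : Int) := by
        simp [specF, hmc]
      refine ⟨d', m + 1, ?_, ?_, by omega, ?_, ?_⟩
      · rw [hsf]
        unfold win
        rfl
      · intro k hk
        exact hd' k hk
      · exact Or.inr ⟨by omega, by simpa using mCand_cov P K r m hmc⟩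
      · refine Or.inr ?_
        rw [hsf]
        unfold improve
        split_ifs with hc
        · refine ⟨?_, by push_cast; omega⟩
          intro hcon
          rw [Prod.mk.injEq] at hcon
          omega
        · push Not at hc
          exact ⟨hc.1, by push_cast; omega⟩

lemma A_eq (P K : List String) (hK : K ≠ []) :
    find_smallest_subarray_covering_set P K =
      [(specF P K P.length).1, (specF P K P.length).2] := by
  obtain ⟨d, L, heq, -, -, -, -⟩ := aFold_spec P K hK P.length le_rfl
  unfold aFold aInit at heq
  rw [List.take_length] at heq
  simp only [find_smallest_subarray_covering_set]
  rw [heq]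

lemma bScan_spec (P : List String) (k : String) (r : Nat) (hr : r < P.length) (c : Nat) :
    ∀ j : Nat, j ≤ r → ∀ seen : Nat, seen = (win P (j + 1) r).count k → seen < c →
    (bScan P k (c : Int) (PySem.List.pyRange (j : Int) (-1) (-1)) (seen : Int) = none →
      (win P 0 r).count k < c) ∧
    (∀ i : Int, bScan P k (c : Int) (PySem.List.pyRange (j : Int) (-1) (-1)) (seen : Int) = some i →
      ∃ iN : Nat, i = (iN : Int) ∧ iN ≤ j ∧
        ∀ l : Nat, (c ≤ (win P l r).count k ↔ l ≤ iN)) := by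
  intro j
  induction j with
  | zero =>
    intro _ seen hseen hlt
    norm_num at hseen
    have hcons : PySem.List.pyRange ((0 : Nat) : Int) (-1) (-1) = [(0 : Int)] := by
      rw [PySem.List.pyRange_neg_one_cons (by omega)]
      rw [show ((0 : Nat) : Int) - 1 = -1 by omega]
      rw [PySem.List.pyRange_neg_one_eq_nil (by omega)]
      simp
    rw [hcons]
    have hget : PySem.List.pyGetD P (0 : Int) "" = P[0]'(by omega) := by
      rw [show ((0 : Int)) = ((0 : Nat) : Int) by simp, PySem.List.pyGetD_natCast]
      exact List.getD_eq_getElem _ _ (by omega)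
    have hwin0 : win P 0 r = P[0]'(by omega) :: win P 1 r := win_cons P 0 r (by omega) hr
    by_cases hpk : P[0]'(by omega) = k
    · have hc0 : (win P 0 r).count k = seen + 1 := by
        rw [hwin0, hpk, List.count_cons_self, hseen]
      by_cases heq : seen + 1 = c
      · have hif : ((seen : Int) + 1 = (c : Int)) := by exact_mod_cast heq
        simp only [bScan, hget, hpk, if_pos hif]
        constructor
        · intro h; cases h
        · intro i hi
          refine ⟨0, by simpa using hi.symm, le_rfl, ?_⟩
          intro l
          constructor
          · intro hcl
            by_contra hl
            have h1l : 1 ≤ l := by omega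
            have := count_win_anti P k 1 l r h1l
            omega
          · intro hl
            have hl0 : l = 0 := by omega
            rw [hl0, hc0, heq]
      · have hif : ¬ ((seen : Int) + 1 = (c : Int)) := by
          intro h; exact heq (by exact_mod_cast h)
        simp only [bScan, hget, hpk, if_neg hif]
        constructor
        · intro _
          omega
        · intro i hi
          cases hi
    · have hc0 : (win P 0 r).count k = seen := by
        rw [hwin0, List.count_cons_of_ne hpk, hseen]
      simp only [bScan, hget, if_neg hpk]
      constructor
      · intro _
        omega
      · intro i hi
        cases hi
  | succ j ih =>
    intro hj seen hseen hlt
    have hseen2 : seen = (win P (j + 2) r).count k := hseen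
    have hcons : PySem.List.pyRange ((j + 1 : Nat) : Int) (-1) (-1) =
        ((j + 1 : Nat) : Int) :: PySem.List.pyRange ((j : Nat) : Int) (-1) (-1) := by
      rw [PySem.List.pyRange_neg_one_cons (by omega),
        show ((j + 1 : Nat) : Int) - 1 = ((j : Nat) : Int) by push_cast; ring]
    rw [hcons]
    have hget : PySem.List.pyGetD P ((j + 1 : Nat) : Int) "" = P[j + 1]'(by omega) := by
      rw [PySem.List.pyGetD_natCast]
      exact List.getD_eq_getElem _ _ (by omega)
    have hwinj : win P (j + 1) r = P[j + 1]'(by omega) :: win P (j + 2) r :=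
      win_cons P (j + 1) r (by omega) hr
    by_cases hpk : P[j + 1]'(by omega) = k
    · have hcj : (win P (j + 1) r).count k = seen + 1 := by
        rw [hwinj, hpk, List.count_cons_self, hseen2]
      by_cases heqc : seen + 1 = c
      · have hif : ((seen : Int) + 1 = (c : Int)) := by exact_mod_cast heqc
        simp only [bScan, hget, hpk, if_pos hif]
        constructor
        · intro h; cases h
        · intro i hi
          refine ⟨j + 1, by simpa using hi.symm, le_rfl, ?_⟩
          intro l
          constructor
          · intro hcl
            by_contra hl
            have := count_win_anti P k (j + 2) l r (by omega)
            omega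
          · intro hl
            have := count_win_anti P k l (j + 1) r hl
            omega
      · have hcast : ((seen : Int) + 1) = ((seen + 1 : Nat) : Int) := by push_cast; ring
        have hif2 : ¬ (((seen + 1 : Nat) : Int) = (c : Int)) := by
          intro h; exact heqc (by exact_mod_cast h)
        simp only [bScan, hget, hpk, if_true, hcast, if_neg hif2]
        obtain ⟨h1, h2⟩ := ih (by omega) (seen + 1) (by omega) (by omega)
        refine ⟨h1, fun i hi => ?_⟩
        obtain ⟨iN, ha, hb, hc2⟩ := h2 i hi
        exact ⟨iN, ha, by omega, hc2⟩
    · have hcj : (win P (j + 1) r).count k = seen := by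
        rw [hwinj, List.count_cons_of_ne hpk, hseen2]
      simp only [bScan, hget, if_neg hpk]
      obtain ⟨h1, h2⟩ := ih (by omega) seen (by omega) hlt
      refine ⟨h1, fun i hi => ?_⟩
      obtain ⟨iN, ha, hb, hc2⟩ := h2 i hi
      exact ⟨iN, ha, by omega, hc2⟩

lemma bCand_go (P K : List String) (r : Nat) (hr : r < P.length) :
    ∀ (ks ks0 : List String) (acc : Option Int),
    (∀ k ∈ ks, k ∈ K) → (∀ k ∈ ks0, k ∈ K) →
    ks0 ++ ks ≠ [] →
    (acc = none → ks0 = []) →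
    (∀ a : Int, acc = some a → ∃ aN : Nat, a = (aN : Int) ∧
      (∀ l : Nat, ((∀ k ∈ ks0, K.count k ≤ (win P l r).count k) ↔ l ≤ aN))) →
    ((bCand P (r : Int) (ks.map (fun k => (k, (K.count k : Int)))) acc = none →
        ∃ k ∈ ks0 ++ ks, (win P 0 r).count k < K.count k) ∧
      (∀ v : Int, bCand P (r : Int) (ks.map (fun k => (k, (K.count k : Int)))) acc = some v →
        ∃ vN : Nat, v = (vN : Int) ∧
          ∀ l : Nat, ((∀ k ∈ ks0 ++ ks, K.count k ≤ (win P l r).count k) ↔ l ≤ vN))) := by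
  intro ks
  induction ks with
  | nil =>
    intro ks0 acc hks hks0 hne haccn haccs
    constructor
    · intro h
      have h0 : ks0 = [] := haccn h
      exact absurd (by simp [h0] : ks0 ++ ([] : List String) = []) hne
    · intro v hv
      obtain ⟨aN, ha, hbrk⟩ := haccs v hv
      exact ⟨aN, ha, by simpa using hbrk⟩
  | cons k ks ih =>
    intro ks0 acc hks hks0 hne haccn haccs
    have hkK : k ∈ K := hks k List.mem_cons_self
    have hc1 : 0 < K.count k := List.count_pos_iff.2 hkK
    have hseen0 : (0 : Nat) = (win P (r + 1) r).count k := by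
      rw [win_empty P (r + 1) r le_rfl]
      rfl
    obtain ⟨hsn, hss⟩ := bScan_spec P k r hr (K.count k) r le_rfl 0 hseen0 hc1
    rw [show ((0 : Nat) : Int) = (0 : Int) by simp] at hsn hss
    cases hscan : bScan P k ((K.count k : Nat) : Int) (PySem.List.pyRange (r : Int) (-1) (-1)) 0 with
    | none =>
      constructor
      · intro _
        exact ⟨k, by simp, hsn hscan⟩
      · intro v hv
        simp only [List.map_cons, bCand, hscan] at hv
        cases hv
    | some i =>
      obtain ⟨iN, rfl, hiR, hbrk⟩ := hss i hscan
      cases acc with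
      | none =>
        have hks00 : ks0 = [] := haccn rfl
        subst hks00
        have hstep : bCand P (r : Int) ((k :: ks).map (fun k => (k, (K.count k : Int)))) none =
            bCand P (r : Int) (ks.map (fun k => (k, (K.count k : Int)))) (some (iN : Int)) := by
          simp only [List.map_cons, bCand, hscan]
        have hmain := ih [k] (some (iN : Int))
          (fun k' hk' => hks k' (List.mem_cons_of_mem _ hk'))
          (by intro k' hk'; rw [List.mem_singleton.1 hk']; exact hkK)
          (by simp)
          (by intro h; cases h)
          (by
            intro a ha
            refine ⟨iN, by simpa using ha.symm, ?_⟩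
            intro l
            simp only [List.mem_singleton]
            constructor
            · intro h
              exact (hbrk l).1 (h k rfl)
            · intro h k' hk'
              subst hk'
              exact (hbrk l).2 h)
        rw [hstep]
        constructor
        · intro h
          obtain ⟨k', hk', hd⟩ := hmain.1 h
          exact ⟨k', by simpa using hk', hd⟩
        · intro v hv
          obtain ⟨vN, rfl, hbrk'⟩ := hmain.2 v hv
          refine ⟨vN, rfl, fun l => ?_⟩
          have h2 := hbrk' l
          constructor
          · intro h
            exact h2.1 (by simpa using h)
          · intro h
            have h3 := h2.2 h
            intro k' hk'
            exact h3 k' (by simpa using hk')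
      | some a0 =>
        obtain ⟨aN, rfl, habrk⟩ := haccs a0 rfl
        have hstep : bCand P (r : Int) ((k :: ks).map (fun k => (k, (K.count k : Int))))
              (some ((aN : Nat) : Int)) =
            bCand P (r : Int) (ks.map (fun k => (k, (K.count k : Int))))
              (some (min ((aN : Nat) : Int) (iN : Int))) := by
          simp only [List.map_cons, bCand, hscan]
        have hmain := ih (ks0 ++ [k]) (some (min ((aN : Nat) : Int) (iN : Int)))
          (fun k' hk' => hks k' (List.mem_cons_of_mem _ hk'))
          (by
            intro k' hk'
            rcases List.mem_append.1 hk' with h | h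
            · exact hks0 k' h
            · rw [List.mem_singleton.1 h]
              exact hkK)
          (by simp)
          (by intro h; cases h)
          (by
            intro a ha
            refine ⟨min aN iN, ?_, ?_⟩
            · have ha2 : a = min ((aN : Nat) : Int) ((iN : Nat) : Int) := by
                simpa using ha.symm
              rw [ha2]
              simp [Nat.cast_min]
            · intro l
              constructor
              · intro h
                refine le_min ?_ ?_
                · exact (habrk l).1 (fun k' hk' => h k' (List.mem_append_left _ hk'))
                · exact (hbrk l).1 (h k (List.mem_append_right _ (List.mem_singleton.2 rfl)))
              · intro h k' hk'
                rcases List.mem_append.1 hk' with hm | hm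
                · exact (habrk l).2 (le_trans h (min_le_left _ _)) k' hm
                · rw [List.mem_singleton.1 hm]
                  exact (hbrk l).2 (le_trans h (min_le_right _ _)))
        rw [hstep]
        constructor
        · intro h
          obtain ⟨k', hk', hd⟩ := hmain.1 h
          refine ⟨k', ?_, hd⟩
          rw [List.append_cons]
          exact hk'
        · intro v hv
          obtain ⟨vN, rfl, hbrk'⟩ := hmain.2 v hv
          refine ⟨vN, rfl, ?_⟩
          intro l
          rw [List.append_cons]
          exact hbrk' l

lemma bCand_mCand (P K : List String) (hK : K ≠ []) (r : Nat) (hr : r < P.length) :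
    (bCand P (r : Int) (PySem.Dict.counter K).items none = none ↔ mCand P K r = none) ∧
    (∀ v : Int, bCand P (r : Int) (PySem.Dict.counter K).items none = some v →
      ∃ m : Nat, v = (m : Int) ∧ mCand P K r = some m) := by
  have hitems : (PySem.Dict.counter K).items =
      (PySem.Set.ofList K).map (fun k => (k, (K.count k : Int))) := PySem.Dict.items_counter K
  obtain ⟨hn, hs⟩ := bCand_go P K r hr (PySem.Set.ofList K) [] none
    (fun k hk => (PySem.Set.mem_ofList K k).1 hk)
    (by intro k hk; cases hk)
    (by
      simp only [List.nil_append]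
      intro h
      have hm := (PySem.Set.mem_ofList K (K.head hK)).2 (List.head_mem hK)
      rw [h] at hm
      cases hm)
    (fun _ => rfl)
    (by intro a ha; cases ha)
  rw [hitems]
  refine ⟨⟨?_, ?_⟩, ?_⟩
  · intro h
    obtain ⟨k, hkmem, hdef⟩ := hn h
    rw [mCand_none_iff]
    apply List.all_eq_false.2
    refine ⟨k, ?_, ?_⟩
    · exact (PySem.Set.mem_ofList K k).1 (by simpa using hkmem)
    · simp only [decide_eq_true_eq]
      omega
  · intro h
    cases hbc : bCand P (r : Int) ((PySem.Set.ofList K).map (fun k => (k, (K.count k : Int)))) none with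
    | none => rfl
    | some v =>
      obtain ⟨vN, rfl, hbrk⟩ := hs v hbc
      exfalso
      rw [mCand_none_iff] at h
      have hcov : covb P K 0 r = true := by
        simp only [covb, List.all_eq_true, decide_eq_true_eq]
        intro k hk
        exact ((hbrk 0).2 (Nat.zero_le _)) k
          (by simpa using (PySem.Set.mem_ofList K k).2 hk)
      rw [hcov] at h
      cases h
  · intro v hv
    obtain ⟨vN, rfl, hbrk⟩ := hs v hv
    refine ⟨vN, rfl, ?_⟩
    have hcovIff : ∀ l : Nat, (covb P K l r = true) ↔ l ≤ vN := by
      intro l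
      rw [show (covb P K l r = true) ↔ (∀ k ∈ K, K.count k ≤ (win P l r).count k) by
        simp [covb, List.all_eq_true]]
      rw [← hbrk l]
      constructor
      · intro h k hk
        exact h k ((PySem.Set.mem_ofList K k).1 (by simpa using hk))
      · intro h k hk
        exact h k (by simpa using (PySem.Set.mem_ofList K k).2 hk)
    have hcov0 : covb P K 0 r = true := (hcovIff 0).2 (Nat.zero_le _)
    have hcovv : covb P K vN r = true := (hcovIff vN).2 le_rfl
    have hvr : vN ≤ r := covb_le P K vN r hK hcovv
    unfold mCand
    rw [if_pos hcov0]
    congr 1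
    have h1 : vN ≤ Nat.findGreatest (fun l => covb P K l r = true) r :=
      Nat.le_findGreatest hvr hcovv
    have h2 : Nat.findGreatest (fun l => covb P K l r = true) r ≤ vN :=
      (hcovIff _).1 (Nat.findGreatest_spec (P := fun l => covb P K l r = true)
        (Nat.zero_le r) hcov0)
    omega

lemma B_loop (P K : List String) (hK : K ≠ []) :
    ∀ r : Nat, r ≤ P.length →
    (PySem.List.pyRange 0 (r : Int) 1).foldl
      (fun best right =>
        match bCand P right (PySem.Dict.counter K).items none with
        | none => best
        | some l => if best = (-1, -1) ∨ right - l < best.2 - best.1 then (l, right) else best)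
      ((-1 : Int), (-1 : Int)) = specF P K r := by
  intro r
  induction r with
  | zero =>
    intro _
    rw [PySem.List.pyRange_one_eq_nil (by omega)]
    rfl
  | succ r ih =>
    intro hr1
    have hr : r < P.length := by omega
    have hsplit : PySem.List.pyRange 0 ((r + 1 : Nat) : Int) 1 =
        PySem.List.pyRange 0 ((r : Nat) : Int) 1 ++ [((r : Nat) : Int)] := by
      rw [show ((r + 1 : Nat) : Int) = ((r : Nat) : Int) + 1 by push_cast; ring]
      exact PySem.List.pyRange_one_succ_right (by omega)
    rw [hsplit, List.foldl_append, ih (by omega)]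
    simp only [List.foldl_cons, List.foldl_nil]
    obtain ⟨hiff, hsome⟩ := bCand_mCand P K hK r hr
    cases hbc : bCand P ((r : Nat) : Int) (PySem.Dict.counter K).items none with
    | none =>
      have hmc : mCand P K r = none := hiff.1 hbc
      simp [specF, hmc]
    | some v =>
      obtain ⟨m, rfl, hmc⟩ := hsome v hbc
      simp [specF, hmc, improve]

lemma B_eq (P K : List String) (hK : K ≠ []) :
    find_smallest_subarray_covering_set_alt P K =
      [(specF P K P.length).1, (specF P K P.length).2] := by
  simp only [find_smallest_subarray_covering_set_alt, PySem.List.len_eq]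
  rw [B_loop P K hK P.length le_rfl]

-- ===== VERDICT (by name: the statement is the Claim_ definition above) =====
theorem find_smallest_subarray_covering_set_spec : Claim_equal_find_smallest_subarray_covering_set := by
  intro P K _ hpre
  unfold Spec_find_smallest_subarray_covering_set
  rcases eq_or_ne K [] with rfl | hK
  · have hp : P = [] := hpre.resolve_left (fun h => h rfl)
    subst hp
    rfl
  · rw [A_eq P K hK, B_eq P K hK]
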